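-- pv_equiv track=rewrite | github.com/aclarke500/Algorithms-Practice | greedy/Light.py | min_lamp
-- ===== SOURCE A (Python) =====
-- def min_lamp(r):
--   tups = []
--   for i in range(len(r)):
--     left = i - r[i]
--     right = i + r[i]
--     if left < 0: left = 0
--     if right > len(r): right = len(r)
--     tups.append((i, left, right, right-left))
--
--   # sort tups by 2nd element
--   T = sorted(tups, key=lambda tup: tup[1])
--
--   turned_on = []
--   covered_end = False
--   curr_left = 0
--
--   while not covered_end:
--     relevant_lights = list(filter(lambda tup: tup[1] == curr_left, T))
--     if not len(relevant_lights):
--       return None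
--     greedy_choice = max(relevant_lights, key=lambda light: light[2])
--     curr_left += greedy_choice[3]
--     turned_on.append(greedy_choice)
--     if greedy_choice[2] >= len(r):
--       covered_end = True
--
--
--   return [tup[0] for tup in turned_on]
-- ===== SOURCE B (Python) =====
-- def min_lamp(r):
--   n = len(r)
--   # one pass: best lamp (index, right end) for each exact left value
--   best = {}
--   for i, x in enumerate(r):
--     left = max(i - x, 0)
--     right = min(i + x, n)
--     cur = best.get(left)
--     if cur is None or right > cur[1]:
--       best[left] = (i, right)
--   turned_on = []
--   curr = 0
--   while True:
--     choice = best.get(curr)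
--     if choice is None:
--       return None
--     turned_on.append(choice[0])
--     if choice[1] >= n:
--       return turned_on
--     curr = choice[1]
-- ===== Notes on version B (the rewrite author's own statement) =====
-- stated objective: alternative
-- what changed: Replaced A's sort plus per-iteration linear filter/max scan by a single pass that groups lamps in a dict keyed by their (clamped) left endpoint keeping the first max-right lamp, so each greedy step is an O(1) lookup.
import Mathlib
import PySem

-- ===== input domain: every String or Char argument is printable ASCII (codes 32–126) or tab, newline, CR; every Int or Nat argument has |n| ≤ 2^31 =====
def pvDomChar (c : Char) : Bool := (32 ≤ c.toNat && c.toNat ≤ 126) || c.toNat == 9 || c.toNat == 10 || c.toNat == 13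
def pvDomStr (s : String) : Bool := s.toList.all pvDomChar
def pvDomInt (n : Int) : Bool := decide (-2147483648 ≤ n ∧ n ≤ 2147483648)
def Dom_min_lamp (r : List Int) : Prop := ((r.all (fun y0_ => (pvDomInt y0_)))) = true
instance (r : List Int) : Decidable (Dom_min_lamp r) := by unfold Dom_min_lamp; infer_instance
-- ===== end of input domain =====

-- B replaces A's sort + per-step linear filter/max scan by a one-pass dict of the best lamp per left
-- endpoint with O(1) lookups per greedy step; the fueled ports are proved equal on all inputs
-- (on inputs where A's Python while loop never terminates, e.g. [0], B's loops identically).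


-- ===== PORT A =====
-- A's while loop, with a fuel bound (r.length + 1 iterations suffice whenever the Python loop
-- terminates: the visited curr_left values are distinct members of {0} ∪ {right endpoints}).
def minLampLoopA (n : Int) (T : List (Int × Int × Int × Int)) :
    Nat → Int → List (Int × Int × Int × Int) → Option (List Int)
  | 0, _, _ => none
  | fuel+1, currLeft, turnedOn =>
    let relevant := T.filter (fun t => t.2.1 == currLeft)
    if relevant.length = 0 then none
    else
      match PySem.List.max? relevant (fun t => t.2.2.1) with
      | none => none  -- unreachable: relevant is nonempty
      | some g =>
          let turnedOn' := turnedOn ++ [g]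
          if g.2.2.1 ≥ n then some (turnedOn'.map (fun t => t.1))
          else minLampLoopA n T fuel (currLeft + g.2.2.2) turnedOn'

def min_lamp (r : List Int) : Option (List Int) :=
  let n : Int := PySem.List.len r
  let tups := (PySem.List.pyRange 0 n 1).foldl (fun acc i =>
      let left := i - PySem.List.pyGetD r i 0
      let right := i + PySem.List.pyGetD r i 0
      let left := if left < 0 then 0 else left
      let right := if right > n then n else right
      acc ++ [(i, left, right, right - left)]) []
  let T := PySem.List.sorted tups (fun t => t.2.1) false
  minLampLoopA n T (r.length + 1) 0 []

-- ===== PORT B =====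
-- B's while loop: one dict lookup per step (same fuel guard as A's loop).
def minLampLoopB (n : Int) (best : PySem.Dict Int (Int × Int)) :
    Nat → Int → List Int → Option (List Int)
  | 0, _, _ => none
  | fuel+1, curr, turnedOn =>
    match best.get? curr with
    | none => none
    | some c =>
        let turnedOn' := turnedOn ++ [c.1]
        if c.2 ≥ n then some turnedOn'
        else minLampLoopB n best fuel c.2 turnedOn'

def min_lamp_alt (r : List Int) : Option (List Int) :=
  let n : Int := PySem.List.len r
  let best := (PySem.List.enumerate r).foldl (fun d p =>
      let left := max (p.1 - p.2) 0
      let right := min (p.1 + p.2) n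
      match d.get? left with
      | none => d.insert left (p.1, right)
      | some cur => if right > cur.2 then d.insert left (p.1, right) else d)
    PySem.Dict.empty
  minLampLoopB n best (r.length + 1) 0 []

-- ===== PRECONDITION & SPEC =====
def Spec_min_lamp (r : List Int) (out : Option (List Int)) : Prop := out = min_lamp_alt r
instance (r : List Int) (out : Option (List Int)) : Decidable (Spec_min_lamp r out) := by unfold Spec_min_lamp; infer_instance

-- ===== CLAIM (what is proved, stated in full; the proofs are below) =====
def Claim_equal_min_lamp : Prop := ∀ (r : List Int), Dom_min_lamp r → Spec_min_lamp r (min_lamp r)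

-- ===== LEMMAS AND PROOFS =====

def pvF (r : List Int) (n i : Int) : Int × Int × Int × Int :=
  let left := i - PySem.List.pyGetD r i 0
  let right := i + PySem.List.pyGetD r i 0
  let left := if left < 0 then 0 else left
  let right := if right > n then n else right
  (i, left, right, right - left)

lemma filter_insertBy {α : Type} (key : α → Int) (x : α) (l : List α) (c : Int)
    (hl : l.Pairwise (fun a b => key a ≤ key b)) :
    (PySem.List.insertBy (fun a b => decide (key a < key b)) x l).filter (fun t => key t == c)
      = l.filter (fun t => key t == c) ++ if key x == c then [x] else [] := by
  induction l with
  | nil => by_cases h : key x = c <;> simp [PySem.List.insertBy, List.filter_cons, h]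
  | cons y ys ih =>
    rw [List.pairwise_cons] at hl
    obtain ⟨hy, hys⟩ := hl
    rw [PySem.List.insertBy]
    by_cases hxy : key x < key y
    · simp only [hxy, decide_true, if_true]
      by_cases hxc : key x = c
      · have hemp : (y :: ys).filter (fun t => key t == c) = [] := by
          rw [List.filter_eq_nil_iff]
          intro a ha
          simp only [beq_iff_eq]
          rcases List.mem_cons.mp ha with h | h
          · subst h; omega
          · have := hy a h; omega
        rw [List.filter_cons]
        simp [hxc, hemp]
      · rw [List.filter_cons]
        simp [hxc]
    · simp only [hxy, decide_false, Bool.false_eq_true, if_false]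
      rw [List.filter_cons, List.filter_cons]
      by_cases hyc : key y = c
      · simp [hyc, ih hys]
      · simp [hyc, ih hys]
lemma filter_sorted {α : Type} (key : α → Int) (xs : List α) (c : Int) :
    (PySem.List.sorted xs key false).filter (fun t => key t == c)
      = xs.filter (fun t => key t == c) := by
  induction xs using List.reverseRecOn with
  | nil => simp [PySem.List.sorted]
  | append_singleton ys y ih =>
    have hs : PySem.List.sorted (ys ++ [y]) key false
        = PySem.List.insertBy (fun a b => decide (key a < key b)) y
            (PySem.List.sorted ys key false) := by
      simp [PySem.List.sorted, List.foldl_append]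
    rw [hs, filter_insertBy key y _ c (PySem.List.sorted_pairwise ys key), ih,
      List.filter_append]
    by_cases h : key y = c <;> simp [List.filter_cons, h]
lemma max?_append_singleton {α : Type} (key : α → Int) (xs : List α) (y : α) :
    PySem.List.max? (xs ++ [y]) key
      = match PySem.List.max? xs key with
        | none => some y
        | some m => if key m < key y then some y else some m := by
  unfold PySem.List.max?
  rw [List.foldl_append]
  rfl
lemma best_get? (r : List Int) (n : Int) (l : List Int) (c : Int) :
    (l.foldl (fun d i =>
        match d.get? ((pvF r n i).2.1) with
        | none => d.insert ((pvF r n i).2.1) (i, (pvF r n i).2.2.1)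
        | some cur => if (pvF r n i).2.2.1 > cur.2 then
            d.insert ((pvF r n i).2.1) (i, (pvF r n i).2.2.1) else d)
      PySem.Dict.empty).get? c
    = (PySem.List.max? ((l.map (pvF r n)).filter (fun t => t.2.1 == c)) (fun t => t.2.2.1)).map
        (fun t => (t.1, t.2.2.1)) := by
  induction l using List.reverseRecOn with
  | nil => simp [PySem.Dict.get?, PySem.Dict.empty, PySem.List.max?]
  | append_singleton l i ih =>
    rw [List.foldl_append, List.map_append, List.filter_append]
    simp only [List.foldl, List.map, List.filter]
    by_cases hc : (pvF r n i).2.1 = c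
    · rw [hc]
      simp only [beq_self_eq_true, if_true]
      cases hm : PySem.List.max? ((l.map (pvF r n)).filter (fun t => t.2.1 == c))
          (fun t => t.2.2.1) with
      | none =>
        have hnil : (l.map (pvF r n)).filter (fun t => t.2.1 == c) = [] :=
          (PySem.List.max?_eq_none_iff _ _).mp hm
        rw [ih, hm]
        simp only [Option.map_none]
        rw [hnil, max?_append_singleton]
        simp [PySem.List.max?, PySem.Dict.get?_insert_self, pvF]
      | some m =>
        rw [ih, hm]
        simp only [Option.map_some]
        rw [max?_append_singleton, hm]
        dsimp only
        simp only [gt_iff_lt]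
        by_cases hgt : m.2.2.1 < (pvF r n i).2.2.1
        · rw [if_pos hgt, if_pos hgt]
          simp [PySem.Dict.get?_insert_self, pvF]
        · rw [if_neg hgt, if_neg hgt, ih, hm]
    · have hbeq : ((pvF r n i).2.1 == c) = false := by simp [hc]
      rw [hbeq]
      simp only [if_false, List.append_nil]
      have hne : c ≠ (pvF r n i).2.1 := fun h => hc h.symm
      cases hd : PySem.Dict.get? (l.foldl (fun d i =>
        match d.get? ((pvF r n i).2.1) with
        | none => d.insert ((pvF r n i).2.1) (i, (pvF r n i).2.2.1)
        | some cur => if (pvF r n i).2.2.1 > cur.2 then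
            d.insert ((pvF r n i).2.1) (i, (pvF r n i).2.2.1) else d)
        PySem.Dict.empty) ((pvF r n i).2.1) with
      | none =>
        dsimp only
        rw [PySem.Dict.get?_insert_of_ne _ _ hne, ih]
      | some cur =>
        dsimp only
        by_cases hgt : (pvF r n i).2.2.1 > cur.2
        · rw [if_pos hgt, PySem.Dict.get?_insert_of_ne _ _ hne, ih]
        · rw [if_neg hgt, ih]
lemma loop_eq (n : Int) (T : List (Int × Int × Int × Int)) (best : PySem.Dict Int (Int × Int))
    (hT : ∀ t ∈ T, t.2.2.2 = t.2.2.1 - t.2.1)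
    (h : ∀ c, best.get? c
        = (PySem.List.max? (T.filter (fun t => t.2.1 == c)) (fun t => t.2.2.1)).map
            (fun t => (t.1, t.2.2.1))) :
    ∀ (fuel : Nat) (c : Int) (acc : List (Int × Int × Int × Int)),
      minLampLoopA n T fuel c acc = minLampLoopB n best fuel c (acc.map (fun t => t.1)) := by
  intro fuel
  induction fuel with
  | zero => intro c acc; rfl
  | succ fuel ih =>
    intro c acc
    rw [minLampLoopA, minLampLoopB, h c]
    cases hm : PySem.List.max? (T.filter (fun t => t.2.1 == c)) (fun t => t.2.2.1) with
    | none =>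
      have hnil : T.filter (fun t => t.2.1 == c) = [] := (PySem.List.max?_eq_none_iff _ _).mp hm
      simp [hnil]
    | some g =>
      have hg : g ∈ T.filter (fun t => t.2.1 == c) := PySem.List.max?_mem hm
      have hne : T.filter (fun t => t.2.1 == c) ≠ [] := by
        intro hh; rw [hh] at hg; cases hg
      have hgT : g ∈ T := (List.mem_filter.mp hg).1
      have hgc : g.2.1 = c := by simpa using (List.mem_filter.mp hg).2
      have hd : c + g.2.2.2 = g.2.2.1 := by rw [hT g hgT, hgc]; ring
      simp only [Option.map_some]
      rw [if_neg (by simpa [List.length_eq_zero_iff] using hne)]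
      by_cases hend : g.2.2.1 ≥ n
      · rw [if_pos hend, if_pos hend]
        simp
      · rw [if_neg hend, if_neg hend, hd, ih]
        simp
lemma pvL_eq (r : List Int) (n i : Int) :
    (pvF r n i).2.1 = max (i - PySem.List.pyGetD r i 0) 0 := by
  show (if i - PySem.List.pyGetD r i 0 < 0 then 0 else i - PySem.List.pyGetD r i 0)
      = max (i - PySem.List.pyGetD r i 0) 0
  rw [max_def]
  split_ifs <;> omega
lemma pvR_eq (r : List Int) (n i : Int) :
    (pvF r n i).2.2.1 = min (i + PySem.List.pyGetD r i 0) n := by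
  show (if i + PySem.List.pyGetD r i 0 > n then n else i + PySem.List.pyGetD r i 0)
      = min (i + PySem.List.pyGetD r i 0) n
  rw [min_def]
  split_ifs <;> omega
lemma ports_eq (r : List Int) : min_lamp r = min_lamp_alt r := by
  have hA : min_lamp r
      = minLampLoopA (PySem.List.len r)
          (PySem.List.sorted
            ((PySem.List.pyRange 0 (PySem.List.len r) 1).foldl
              (fun acc i => acc ++ [pvF r (PySem.List.len r) i]) [])
            (fun t => t.2.1) false)
          (r.length + 1) 0 [] := rfl
  have hB : min_lamp_alt r
      = minLampLoopB (PySem.List.len r)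
          ((PySem.List.enumerate r).foldl
            (fun d p =>
              match d.get? (max (p.1 - p.2) 0) with
              | none => d.insert (max (p.1 - p.2) 0) (p.1, min (p.1 + p.2) (PySem.List.len r))
              | some cur => if min (p.1 + p.2) (PySem.List.len r) > cur.2 then
                  d.insert (max (p.1 - p.2) 0) (p.1, min (p.1 + p.2) (PySem.List.len r)) else d)
            PySem.Dict.empty)
          (r.length + 1) 0 [] := rfl
  rw [hA, hB, PySem.List.foldl_append_singleton_eq_map, List.nil_append,
    PySem.List.enumerate_eq_map_pyRange r 0, List.foldl_map]
  have hstep : (fun (d : PySem.Dict Int (Int × Int)) (i : Int) =>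
      match d.get? (max ((i, PySem.List.pyGetD r i 0).1 - (i, PySem.List.pyGetD r i 0).2) 0) with
      | none => d.insert (max ((i, PySem.List.pyGetD r i 0).1 - (i, PySem.List.pyGetD r i 0).2) 0)
          ((i, PySem.List.pyGetD r i 0).1,
           min ((i, PySem.List.pyGetD r i 0).1 + (i, PySem.List.pyGetD r i 0).2) (PySem.List.len r))
      | some cur => if min ((i, PySem.List.pyGetD r i 0).1 + (i, PySem.List.pyGetD r i 0).2) (PySem.List.len r) > cur.2 then
          d.insert (max ((i, PySem.List.pyGetD r i 0).1 - (i, PySem.List.pyGetD r i 0).2) 0)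
            ((i, PySem.List.pyGetD r i 0).1,
             min ((i, PySem.List.pyGetD r i 0).1 + (i, PySem.List.pyGetD r i 0).2) (PySem.List.len r)) else d)
      = (fun (d : PySem.Dict Int (Int × Int)) (i : Int) =>
      match d.get? ((pvF r (PySem.List.len r) i).2.1) with
      | none => d.insert ((pvF r (PySem.List.len r) i).2.1) (i, (pvF r (PySem.List.len r) i).2.2.1)
      | some cur => if (pvF r (PySem.List.len r) i).2.2.1 > cur.2 then
          d.insert ((pvF r (PySem.List.len r) i).2.1) (i, (pvF r (PySem.List.len r) i).2.2.1) else d) := by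
    funext d i
    simp only [pvL_eq, pvR_eq]
  rw [hstep]
  apply loop_eq
  · intro t ht
    rw [PySem.List.mem_sorted] at ht
    obtain ⟨i, _, rfl⟩ := List.mem_map.mp ht
    rfl
  · intro c
    rw [filter_sorted, best_get?]

-- ===== VERDICT (by name: the statement is the Claim_ definition above) =====
theorem min_lamp_spec : Claim_equal_min_lamp := by
  intro r _
  exact ports_eq r
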